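-- pv_equiv track=rewrite | github.com/Sqsert/Sqsert-Prohramuvannya-movoyu-Python | Лабораторна робота № 2/Task1.py | calculate_y
-- ===== SOURCE A (Python) =====
-- def calculate_y(n):
--     if n <= 0:
--         return "Помилка: n має бути більше 0"
--     else:
--         result = 1
--         for i in range(2, 2*n + 1, 2):
--             result *= i
--         return result
-- ===== SOURCE B (Python) =====
-- import math
--
-- def calculate_y(n):
--     if n <= 0:
--         return "Помилка: n має бути більше 0"
--     return 2**n * math.factorial(n)
-- ===== Notes on version B (the rewrite author's own statement) =====
-- stated objective: faster
-- what changed: Replaces the Python-level accumulation loop over range(2, 2n+1, 2) with the closed form 2**n * math.factorial(n), using the identity 2*4*...*2n = 2^n * n!.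
-- outside the precondition, e.g. on calculate_y(0): A returns 'Помилка: n має бути більше 0', B returns 'Помилка: n має бути більше 0'
import Mathlib
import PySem

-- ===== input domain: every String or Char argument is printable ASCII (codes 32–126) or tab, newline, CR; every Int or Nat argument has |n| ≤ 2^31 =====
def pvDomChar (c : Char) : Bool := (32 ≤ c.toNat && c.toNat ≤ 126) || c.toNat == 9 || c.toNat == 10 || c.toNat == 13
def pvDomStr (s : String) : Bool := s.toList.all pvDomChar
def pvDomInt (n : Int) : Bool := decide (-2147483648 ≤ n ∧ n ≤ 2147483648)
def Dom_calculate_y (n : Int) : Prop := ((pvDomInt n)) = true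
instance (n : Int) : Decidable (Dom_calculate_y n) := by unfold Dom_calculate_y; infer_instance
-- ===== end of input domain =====

-- B replaces A's accumulation loop by the closed form 2^n * n!; equivalence on n ≥ 1 (for n ≤ 0
-- both Pythons return an error string, outside the Int return type, hence excluded by Pre_).

-- ===== PORT A =====
-- A: result = 1; for i in range(2, 2*n+1, 2): result *= i; return result (n ≤ 0: error string, excluded by Pre_)
def calculate_y (n : Int) : Int :=
  if n ≤ 0 then 0
  else (PySem.List.pyRange 2 (2*n + 1) 2).foldl (fun result i => result * i) 1

-- ===== PORT B =====
-- B: 2**n * math.factorial(n)  (math.factorial ported as Nat.factorial)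
def calculate_y_alt (n : Int) : Int :=
  if n ≤ 0 then 0
  else (2 : Int)^n.toNat * (Nat.factorial n.toNat : Int)

-- ===== PRECONDITION & SPEC =====
-- Pre_ excludes n ≤ 0, where A (and B) return a Ukrainian error STRING instead of an int — no Int value to claim.
def Pre_calculate_y (n : Int) : Prop := 1 ≤ n
instance (n : Int) : Decidable (Pre_calculate_y n) := by unfold Pre_calculate_y; infer_instance
def pvWitness_calculate_y : Int := 3

def Spec_calculate_y (n : Int) (out : Int) : Prop := out = calculate_y_alt n
instance (n : Int) (out : Int) : Decidable (Spec_calculate_y n out) := by unfold Spec_calculate_y; infer_instance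

-- ===== CLAIM (what is proved, stated in full; the proofs are below) =====
def Claim_equal_calculate_y : Prop := ∀ (n : Int), Dom_calculate_y n → Pre_calculate_y n → Spec_calculate_y n (calculate_y n)

-- ===== LEMMAS AND PROOFS =====

-- product of the first m even numbers, as A's loop computes it over (List.range m)
theorem pv_prod_even (m : Nat) :
    ((List.range m).map (fun k : Nat => (2:Int) + 2 * k)).foldl (fun r i => r * i) 1
      = (2:Int)^m * (Nat.factorial m : Int) := by
  induction m with
  | zero => simp [Nat.factorial]
  | succ m ih =>
      rw [List.range_succ, List.map_append, List.foldl_append]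
      simp only [List.map_cons, List.map_nil, List.foldl_cons, List.foldl_nil]
      rw [ih, Nat.factorial_succ]
      push_cast
      ring

theorem pv_range_even (n : Int) (hn : 1 ≤ n) :
    PySem.List.pyRange 2 (2*n + 1) 2
      = (List.range n.toNat).map (fun k : Nat => (2:Int) + 2 * k) := by
  rw [PySem.List.pyRange_of_pos 2 (2*n+1) (by norm_num)]
  have hlt : (2:Int) < 2*n + 1 := by omega
  rw [if_pos hlt]
  have : (2*n + 1 - 2 + 2 - 1) / 2 = n := by omega
  rw [this]

-- ===== VERDICT (by name: the statement is the Claim_ definition above) =====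
theorem calculate_y_spec : Claim_equal_calculate_y := by
  intro n _ hpre
  unfold Spec_calculate_y calculate_y calculate_y_alt
  unfold Pre_calculate_y at hpre
  have hn : ¬ n ≤ 0 := by omega
  rw [if_neg hn, if_neg hn, pv_range_even n hpre, pv_prod_even]
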